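-- pv_equiv track=rewrite | github.com/Dheerajkumarsaw/misfits-ai-agent | model/conversation_graph.py | diversify_events_by_club
-- ===== SOURCE A (Python) =====
-- def diversify_events_by_club(events: list, max_per_club: int = 1) -> list:
--     """
--     Diversify events to avoid showing too many from the same club/venue
--
--     Args:
--         events: List of event dictionaries
--         max_per_club: Maximum events to show from same club (default: 1)
--
--     Returns:
--         Diversified list of events
--     """
--     seen_clubs = {}
--     diversified = []
--     remaining = []
--
--     for event in events:
--         club = event.get('club_name', '')
--
--         if not club:
--             # No club name, add to diversified
--             diversified.append(event)
--             continue
--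
--         club_count = seen_clubs.get(club, 0)
--
--         if club_count < max_per_club:
--             # Haven't reached limit for this club
--             diversified.append(event)
--             seen_clubs[club] = club_count + 1
--         else:
--             # Already have enough from this club, save for later
--             remaining.append(event)
--
--     # If we need more events, add remaining ones
--     diversified.extend(remaining)
--
--     return diversified
-- ===== SOURCE B (Python) =====
-- def diversify_events_by_club(events: list, max_per_club: int = 1) -> list:
--     """Tag each event with a sort group (0 = keep in place, 1 = deferred) in one
--     counting pass, then produce the result with a single stable sort by group."""
--     counts = {}
--     groups = []
--     for event in events:
--         club = event.get('club_name', '')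
--         if not club:
--             groups.append(0)
--         else:
--             c = counts.get(club, 0)
--             counts[club] = c + 1
--             groups.append(0 if c < max_per_club else 1)
--     return [e for _, e in sorted(zip(groups, events), key=lambda p: p[0])]
-- ===== Notes on version B (the rewrite author's own statement) =====
-- stated objective: alternative
-- what changed: B replaces A's two-bucket append-and-concatenate control flow by computing a 0/1 sort group per event with an always-incrementing counter and producing the output via one stable sort by group.
import Mathlib
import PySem

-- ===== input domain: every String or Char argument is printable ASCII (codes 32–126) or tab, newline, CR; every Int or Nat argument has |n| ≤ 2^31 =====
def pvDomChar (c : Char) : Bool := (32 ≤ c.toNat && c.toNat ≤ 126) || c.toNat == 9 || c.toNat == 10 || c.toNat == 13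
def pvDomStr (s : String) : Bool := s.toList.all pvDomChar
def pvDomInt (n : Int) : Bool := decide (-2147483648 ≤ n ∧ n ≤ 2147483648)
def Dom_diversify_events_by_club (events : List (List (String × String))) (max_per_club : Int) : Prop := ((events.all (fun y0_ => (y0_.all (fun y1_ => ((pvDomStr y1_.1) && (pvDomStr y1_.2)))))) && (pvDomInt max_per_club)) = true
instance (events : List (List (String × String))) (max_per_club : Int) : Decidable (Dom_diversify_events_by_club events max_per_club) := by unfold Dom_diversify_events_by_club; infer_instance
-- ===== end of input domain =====

-- B tags each event with a 0/1 sort group in one counting pass and emits the result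
-- with a single stable sort by group, instead of A's two-bucket append-and-concatenate.

-- ===== PORT A =====
def diversify_events_by_club (events : List (List (String × String))) (max_per_club : Int) : List (List (String × String)) :=
  let st := events.foldl
    (fun (st : PySem.Dict String Int × List (List (String × String)) × List (List (String × String))) event =>
      let seen_clubs := st.1
      let diversified := st.2.1
      let remaining := st.2.2
      let club := (PySem.Dict.mk event).getD "club_name" ""
      if club = "" then (seen_clubs, diversified ++ [event], remaining)
      else
        let club_count := seen_clubs.getD club 0
        if club_count < max_per_club then
          (seen_clubs.insert club (club_count + 1), diversified ++ [event], remaining)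
        else (seen_clubs, diversified, remaining ++ [event]))
    (PySem.Dict.empty, [], [])
  st.2.1 ++ st.2.2

-- ===== PORT B =====
def diversify_events_by_club_alt (events : List (List (String × String))) (max_per_club : Int) : List (List (String × String)) :=
  let st := events.foldl
    (fun (st : PySem.Dict String Int × List Int) event =>
      let counts := st.1
      let groups := st.2
      let club := (PySem.Dict.mk event).getD "club_name" ""
      if club = "" then (counts, groups ++ [(0 : Int)])
      else
        let c := counts.getD club 0
        (counts.insert club (c + 1), groups ++ [if c < max_per_club then (0 : Int) else 1]))
    (PySem.Dict.empty, [])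
  (PySem.List.sorted (st.2.zip events) Prod.fst false).map Prod.snd

-- ===== PRECONDITION & SPEC =====
def Spec_diversify_events_by_club (events : List (List (String × String))) (max_per_club : Int) (out : List (List (String × String))) : Prop := out = diversify_events_by_club_alt events max_per_club
instance (events : List (List (String × String))) (max_per_club : Int) (out : List (List (String × String))) : Decidable (Spec_diversify_events_by_club events max_per_club out) := by unfold Spec_diversify_events_by_club; infer_instance

-- ===== CLAIM (what is proved, stated in full; the proofs are below) =====
def Claim_equal_diversify_events_by_club : Prop := ∀ (events : List (List (String × String))) (max_per_club : Int), Dom_diversify_events_by_club events max_per_club → Spec_diversify_events_by_club events max_per_club (diversify_events_by_club events max_per_club)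

-- ===== LEMMAS AND PROOFS =====

-- Reference classification: the tagged event list, driven by A's capped dict.
def pvTag (m : Int) (seen : PySem.Dict String Int) :
    List (List (String × String)) → List (Int × List (String × String))
  | [] => []
  | e :: rest =>
    let club := (PySem.Dict.mk e).getD "club_name" ""
    if club = "" then (0, e) :: pvTag m seen rest
    else
      let c := seen.getD club 0
      if c < m then (0, e) :: pvTag m (seen.insert club (c + 1)) rest
      else (1, e) :: pvTag m seen rest

lemma pvTag_fst (m : Int) (seen : PySem.Dict String Int) (l : List (List (String × String))) :
    ∀ p ∈ pvTag m seen l, p.1 = 0 ∨ p.1 = 1 := by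
  induction l generalizing seen with
  | nil => simp [pvTag]
  | cons e rest ih =>
    intro p hp
    simp only [pvTag] at hp
    split at hp
    · rcases List.mem_cons.mp hp with h | h
      · simp [h]
      · exact ih _ p h
    · split at hp <;> rcases List.mem_cons.mp hp with h | h
      · simp [h]
      · exact ih _ p h
      · simp [h]
      · exact ih _ p h

lemma pvTag_snd (m : Int) (seen : PySem.Dict String Int) (l : List (List (String × String))) :
    (pvTag m seen l).map Prod.snd = l := by
  induction l generalizing seen with
  | nil => simp [pvTag]
  | cons e rest ih =>
    simp only [pvTag]
    split
    · simpa using ih seen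
    · split <;> simpa using ih _

-- A's fold appends exactly the tagged 0-group to `diversified` and the 1-group to `remaining`.
lemma pvA_fold (m : Int) (l : List (List (String × String))) :
    ∀ (seen : PySem.Dict String Int) (dv rm : List (List (String × String))),
      l.foldl
        (fun (st : PySem.Dict String Int × List (List (String × String)) × List (List (String × String))) event =>
          let seen_clubs := st.1
          let diversified := st.2.1
          let remaining := st.2.2
          let club := (PySem.Dict.mk event).getD "club_name" ""
          if club = "" then (seen_clubs, diversified ++ [event], remaining)
          else
            let club_count := seen_clubs.getD club 0
            if club_count < m then
              (seen_clubs.insert club (club_count + 1), diversified ++ [event], remaining)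
            else (seen_clubs, diversified, remaining ++ [event]))
        (seen, dv, rm)
      = (((l.foldl (fun s event =>
            let club := (PySem.Dict.mk event).getD "club_name" ""
            if club = "" then s
            else let c := s.getD club 0
                 if c < m then s.insert club (c + 1) else s) seen)),
         dv ++ ((pvTag m seen l).filter (fun p => p.1 == 0)).map Prod.snd,
         rm ++ ((pvTag m seen l).filter (fun p => !(p.1 == 0))).map Prod.snd) := by
  induction l with
  | nil => intro seen dv rm; simp [pvTag]
  | cons e rest ih =>
    intro seen dv rm
    simp only [List.foldl_cons, pvTag]
    split
    · rw [ih]; simp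
    · split
      · rw [ih]; simp
      · rw [ih]
        simp

-- B's fold produces exactly the tagged groups, given the dict invariant linking
-- A's capped counter to B's always-incrementing counter.
lemma pvB_fold (m : Int) (l : List (List (String × String))) :
    ∀ (seen counts : PySem.Dict String Int) (gs : List Int),
      (∀ k, 0 ≤ counts.getD k 0 ∧ seen.getD k 0 = min (counts.getD k 0) (max m 0)) →
      (l.foldl
        (fun (st : PySem.Dict String Int × List Int) event =>
          let counts := st.1
          let groups := st.2
          let club := (PySem.Dict.mk event).getD "club_name" ""
          if club = "" then (counts, groups ++ [(0 : Int)])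
          else
            let c := counts.getD club 0
            (counts.insert club (c + 1), groups ++ [if c < m then (0 : Int) else 1]))
        (counts, gs)).2
      = gs ++ (pvTag m seen l).map Prod.fst := by
  induction l with
  | nil => intro seen counts gs _; simp [pvTag]
  | cons e rest ih =>
    intro seen counts gs hinv
    simp only [List.foldl_cons, pvTag]
    split
    · rw [ih seen _ _ hinv]; simp
    · rename_i hclub
      obtain ⟨h1, h2⟩ := hinv ((PySem.Dict.mk e).getD "club_name" "")
      by_cases hlt : seen.getD ((PySem.Dict.mk e).getD "club_name" "") 0 < m
      · have hc : counts.getD ((PySem.Dict.mk e).getD "club_name" "") 0 < m := by omega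
        simp only [if_pos hlt, if_pos hc]
        rw [ih (seen.insert ((PySem.Dict.mk e).getD "club_name" "")
              (seen.getD ((PySem.Dict.mk e).getD "club_name" "") 0 + 1)) _ _ ?_]
        · simp
        · intro k
          obtain ⟨g1, g2⟩ := hinv k
          by_cases hk : k = (PySem.Dict.mk e).getD "club_name" "" <;>
            simp only [PySem.Dict.getD_insert, hk, if_true, if_false] <;>
            [omega; exact ⟨g1, g2⟩]
      · have hc : ¬ counts.getD ((PySem.Dict.mk e).getD "club_name" "") 0 < m := by omega
        simp only [if_neg hlt, if_neg hc]
        rw [ih seen _ _ ?_]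
        · simp
        · intro k
          obtain ⟨g1, g2⟩ := hinv k
          by_cases hk : k = (PySem.Dict.mk e).getD "club_name" "" <;>
            simp only [PySem.Dict.getD_insert, hk, if_true, if_false] <;>
            [omega; exact ⟨g1, g2⟩]

-- A stable sort of a 0/1-keyed list is the 0-block followed by the 1-block.
lemma pvInsertBy_middle {α : Type} (before : α → α → Bool) (x : α) :
    ∀ (a b : List α), (∀ y ∈ a, before x y = false) → (∀ y ∈ b, before x y = true) →
      PySem.List.insertBy before x (a ++ b) = a ++ x :: b := by
  intro a
  induction a with
  | nil =>
    intro b _ hb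
    cases b with
    | nil => rfl
    | cons z zs => simp [PySem.List.insertBy, hb z (by simp)]
  | cons y ys ih =>
    intro b ha hb
    have hy : before x y = false := ha y (by simp)
    simp only [List.cons_append, PySem.List.insertBy, hy, Bool.false_eq_true, if_false]
    rw [ih b (fun z hz => ha z (by simp [hz])) hb]

lemma pvSorted01 (t : List (Int × List (String × String)))
    (h : ∀ p ∈ t, p.1 = 0 ∨ p.1 = 1) :
    PySem.List.sorted t Prod.fst false
      = t.filter (fun p => p.1 == 0) ++ t.filter (fun p => !(p.1 == 0)) := by
  rw [PySem.List.sorted_eq_foldl_insertBy]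
  induction t using List.reverseRecOn with
  | nil => simp
  | append_singleton rest x ih =>
    rw [List.foldl_append]
    simp only [List.foldl_cons, List.foldl_nil]
    rw [ih (fun p hp => h p (by simp [hp]))]
    rcases h x (by simp) with h0 | h1
    · rw [pvInsertBy_middle]
      · simp [List.filter_append, h0]
      · intro y hy
        have hy0 : y.1 = 0 := by
          have := List.of_mem_filter hy
          simpa using this
        simp [h0, hy0]
      · intro y hy
        have := List.of_mem_filter hy
        have hy1 : y.1 = 1 := by
          rcases h y (by simp [List.mem_filter.mp hy |>.1]) with h' | h'
          · simp [h'] at this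
          · exact h'
        simp [h0, hy1]
    · rw [PySem.List.insertBy_of_forall_not_before]
      · simp [List.filter_append, h1, List.append_assoc]
      · intro y hy
        rcases List.mem_append.mp hy with hy' | hy' <;>
          rcases h y (by simp [List.mem_filter.mp hy' |>.1]) with h' | h' <;>
            simp [h1, h']

lemma pvZip_eq {α β : Type} (t : List (α × β)) (l : List β) (h : t.map Prod.snd = l) :
    (t.map Prod.fst).zip l = t := by
  subst h
  induction t with
  | nil => rfl
  | cons p rest ih => simp [ih]

-- ===== VERDICT (by name: the statement is the Claim_ definition above) =====
theorem diversify_events_by_club_spec : Claim_equal_diversify_events_by_club := by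
  intro events m _
  unfold Spec_diversify_events_by_club diversify_events_by_club diversify_events_by_club_alt
  have hA := pvA_fold m events PySem.Dict.empty [] []
  have hB := pvB_fold m events PySem.Dict.empty PySem.Dict.empty []
    (by intro k; simp [PySem.Dict.getD_empty])
  simp only [hA, hB, List.nil_append]
  rw [pvZip_eq (pvTag m PySem.Dict.empty events) events (pvTag_snd m PySem.Dict.empty events),
    pvSorted01 _ (pvTag_fst m PySem.Dict.empty events)]
  simp [List.map_append]
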